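-- pv_equiv track=rewrite | github.com/bio2bel/ec | src/bio2bel_expasy/parser/database.py | group_by_id
-- ===== SOURCE A (Python) =====
-- def group_by_id(lines):
--     groups = []
--
--     for line in lines:  # TODO replace with itertools.groupby
--         line = line.strip()
--
--         if line.startswith('ID'):
--             groups.append([])
--
--         if not groups:
--             continue
--
--         descriptor = line[:2]
--         value = line[5:]
--
--         groups[-1].append((descriptor, value))
--
--     return groups
-- ===== SOURCE B (Python) =====
-- def group_by_id(lines):
--     stripped = [line.strip() for line in lines]
--     ids = [i for i, line in enumerate(stripped) if line.startswith('ID')]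
--     bounds = ids + [len(stripped)]
--     return [[(line[:2], line[5:]) for line in stripped[start:end]]
--             for start, end in zip(bounds, bounds[1:])]
-- ===== Notes on version B (the rewrite author's own statement) =====
-- stated objective: alternative
-- what changed: Replaced the stateful single pass (append-to-last-group with a skip flag) by a boundary-index decomposition: strip all lines, collect the indices of 'ID' lines, and build each record by slicing between consecutive boundaries.
import Mathlib
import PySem

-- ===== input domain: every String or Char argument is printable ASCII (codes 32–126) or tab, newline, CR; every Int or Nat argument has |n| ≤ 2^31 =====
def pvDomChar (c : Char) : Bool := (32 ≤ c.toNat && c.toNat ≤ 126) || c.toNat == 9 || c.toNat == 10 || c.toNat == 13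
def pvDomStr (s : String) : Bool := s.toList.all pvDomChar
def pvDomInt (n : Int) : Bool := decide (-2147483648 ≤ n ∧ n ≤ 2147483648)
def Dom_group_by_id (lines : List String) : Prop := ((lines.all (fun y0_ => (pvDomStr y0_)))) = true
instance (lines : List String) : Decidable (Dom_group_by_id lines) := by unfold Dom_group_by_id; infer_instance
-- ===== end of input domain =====

-- B replaces A's stateful single pass by a boundary-index decomposition (indices of 'ID'
-- lines, then slices between consecutive boundaries); same cost, alternative structure.

-- ===== PORT A =====
def group_by_id (lines : List String) : List (List (String × String)) :=
  lines.foldl (fun groups line0 =>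
    let line := PySem.Str.strip line0
    let groups := if PySem.Str.startswith line "ID" then groups ++ [[]] else groups
    if groups = [] then groups
    else
      let descriptor := PySem.Str.slice line none (some 2)
      let value := PySem.Str.slice line (some 5) none
      groups.dropLast ++ [groups.getLastD [] ++ [(descriptor, value)]]) []

-- ===== PORT B =====
def group_by_id_alt (lines : List String) : List (List (String × String)) :=
  let stripped := lines.map PySem.Str.strip
  let ids := (PySem.List.enumerate stripped).filterMap
      (fun q => if PySem.Str.startswith q.2 "ID" then some q.1 else none)
  let bounds := ids ++ [(stripped.length : Int)]
  (bounds.zip bounds.tail).map (fun q =>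
    (PySem.List.slice stripped (some q.1) (some q.2)).map
      (fun line => (PySem.Str.slice line none (some 2), PySem.Str.slice line (some 5) none)))

-- ===== PRECONDITION & SPEC =====
def Spec_group_by_id (lines : List String) (out : List (List (String × String))) : Prop := out = group_by_id_alt lines
instance (lines : List String) (out : List (List (String × String))) : Decidable (Spec_group_by_id lines out) := by unfold Spec_group_by_id; infer_instance

-- ===== CLAIM (what is proved, stated in full; the proofs are below) =====
def Claim_equal_group_by_id : Prop := ∀ (lines : List String), Dom_group_by_id lines → Spec_group_by_id lines (group_by_id lines)

-- ===== LEMMAS AND PROOFS =====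

-- proof-side abbreviations: the line predicate and the per-line tuple
def pvP (l : String) : Bool := PySem.Str.startswith l "ID"
def pvF (l : String) : String × String :=
  (PySem.Str.slice l none (some 2), PySem.Str.slice l (some 5) none)

-- A's loop body on an already-stripped line
def pvStep (groups : List (List (String × String))) (line : String) :
    List (List (String × String)) :=
  let groups := if pvP line then groups ++ [[]] else groups
  if groups = [] then groups
  else groups.dropLast ++ [groups.getLastD [] ++ [pvF line]]

-- structural reference: (pending run before the next ID going backwards, finished segments)
def pvAux : List String → List (String × String) × List (List (String × String))
  | [] => ([], [])
  | l :: t =>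
    let r := pvAux t
    if pvP l then ([], (pvF l :: r.1) :: r.2) else (pvF l :: r.1, r.2)

-- Nat positions of the ID lines
def pvIdx : List String → List Nat
  | [] => []
  | l :: t => if pvP l then 0 :: (pvIdx t).map (· + 1) else (pvIdx t).map (· + 1)

-- B's slicing construction, in Nat form
def pvBn (s : List String) : List (List (String × String)) :=
  let bs := pvIdx s ++ [s.length]
  (bs.zip bs.tail).map (fun q => ((s.drop q.1).take (q.2 - q.1)).map pvF)
theorem pvA_foldl (lines : List String) :
    group_by_id lines = (lines.map PySem.Str.strip).foldl pvStep [] := by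
  rw [List.foldl_map]
  simp [group_by_id, pvStep, pvP, pvF]

theorem pvStep_invariant (s : List String) (gs : List (List (String × String)))
    (g : List (String × String)) :
    s.foldl pvStep (gs ++ [g]) = gs ++ ((g ++ (pvAux s).1) :: (pvAux s).2) := by
  induction s generalizing gs g with
  | nil => simp [pvAux]
  | cons l t ih =>
    simp only [List.foldl_cons, pvStep, pvAux]
    by_cases h : pvP l
    · simp only [h, if_pos]
      have h1 : (gs ++ [g]) ++ [[]] ≠ [] := by simp
      rw [if_neg (by simp)]
      simp only [List.dropLast_concat, List.getLastD_concat]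
      have := ih (gs ++ [g]) [pvF l]
      simp only [List.append_assoc] at this ⊢
      simpa using this
    · simp only [h, if_neg, Bool.false_eq_true, not_false_iff]
      rw [if_neg (by simp)]
      simp only [List.dropLast_concat, List.getLastD_concat]
      have := ih gs (g ++ [pvF l])
      simpa using this
theorem pvA_eq_aux (s : List String) : s.foldl pvStep [] = (pvAux s).2 := by
  induction s with
  | nil => simp [pvAux]
  | cons l t ih =>
    simp only [List.foldl_cons, pvStep, pvAux]
    by_cases h : pvP l
    · simp only [h, if_pos]
      rw [if_neg (by simp)]
      have := pvStep_invariant t [] [pvF l]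
      simp only [List.nil_append] at this
      simp [this]
    · simp [h, ih]

theorem pvEnum_filterMap (s : List String) (j : Nat) :
    (PySem.List.enumerate s (j : Int)).filterMap
        (fun q => if PySem.Str.startswith q.2 "ID" then some q.1 else none) =
      (pvIdx s).map (fun n => ((j + n : Nat) : Int)) := by
  induction s generalizing j with
  | nil => simp [PySem.List.enumerate_nil, pvIdx]
  | cons l t ih =>
    rw [PySem.List.enumerate_cons]
    have hj : (j : Int) + 1 = ((j + 1 : Nat) : Int) := by push_cast; ring
    simp only [List.filterMap_cons, pvIdx]
    by_cases h : PySem.Str.startswith l "ID"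
    · simp only [h, if_pos, pvP, hj, ih]
      simp only [List.map_cons, List.map_map]
      congr 1
      apply List.map_congr_left; intro n _
      simp only [Function.comp_apply]; push_cast; ring
    · simp only [pvP, h, if_neg, Bool.false_eq_true, not_false_iff, hj, ih]
      rw [List.map_map]
      apply List.map_congr_left; intro n _; simp only [Function.comp_apply]; push_cast; ring
theorem pvB_eq_bn (lines : List String) :
    group_by_id_alt lines = pvBn (lines.map PySem.Str.strip) := by
  show (let stripped := lines.map PySem.Str.strip;
    let ids := (PySem.List.enumerate stripped).filterMap
      (fun q => if PySem.Str.startswith q.2 "ID" then some q.1 else none);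
    let bounds := ids ++ [(stripped.length : Int)];
    (bounds.zip bounds.tail).map (fun q =>
      (PySem.List.slice stripped (some q.1) (some q.2)).map
        (fun line => (PySem.Str.slice line none (some 2), PySem.Str.slice line (some 5) none)))) = _
  simp only []
  set s := lines.map PySem.Str.strip with hs
  rw [show PySem.List.enumerate s = PySem.List.enumerate s ((0 : Nat) : Int) from rfl,
    pvEnum_filterMap]
  unfold pvBn
  simp only []
  simp only [Nat.zero_add]
  have hb : (pvIdx s).map (fun n : Nat => (n : Int)) ++ [(s.length : Int)]
      = (pvIdx s ++ [s.length]).map (fun n : Nat => (n : Int)) := by simp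
  rw [hb, ← List.map_tail, List.zip_map]
  rw [List.map_map]
  apply List.map_congr_left
  intro q _
  simp only [Function.comp_apply, Prod.map_fst, Prod.map_snd]
  rw [PySem.List.slice_natCast]
  congr 1
theorem pvHead_idx (t : List String) :
    (pvIdx t ++ [t.length]).head? = some ((t.takeWhile (fun x => !pvP x)).length) := by
  induction t with
  | nil => simp [pvIdx]
  | cons l t ih =>
    simp only [pvIdx, List.takeWhile_cons]
    by_cases h : pvP l
    · simp [h]
    · simp only [h, Bool.false_eq_true, ite_false, Bool.not_false, if_pos]
      have : (pvIdx t).map (· + 1) ++ [t.length + 1] = (pvIdx t ++ [t.length]).map (· + 1) := by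
        simp
      rw [show (l :: t).length = t.length + 1 from rfl, this, List.head?_map, ih]
      simp

theorem pvBn_cons_neg (l : String) (t : List String) (h : pvP l = false) :
    pvBn (l :: t) = pvBn t := by
  unfold pvBn
  simp only [pvIdx, h, Bool.false_eq_true, ite_false]
  have hb : (pvIdx t).map (· + 1) ++ [(l :: t).length] = (pvIdx t ++ [t.length]).map (· + 1) := by
    simp
  rw [hb, ← List.map_tail, List.zip_map, List.map_map]
  apply List.map_congr_left
  intro q _
  simp only [Function.comp_apply, Prod.map_fst, Prod.map_snd, List.drop_succ_cons]
  have e : q.2 + 1 - (q.1 + 1) = q.2 - q.1 := by omega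
  rw [e]

theorem pvBn_cons_pos (l : String) (t : List String) (h : pvP l = true) :
    pvBn (l :: t) = (pvF l :: (t.takeWhile (fun x => !pvP x)).map pvF) :: pvBn t := by
  unfold pvBn
  simp only [pvIdx, h, if_pos]
  have hb : (pvIdx t).map (· + 1) ++ [(l :: t).length] = (pvIdx t ++ [t.length]).map (· + 1) := by
    simp
  rw [List.cons_append, hb]
  obtain ⟨y, ys, hy⟩ : ∃ y ys, pvIdx t ++ [t.length] = y :: ys := by
    cases hc : pvIdx t ++ [t.length] with
    | nil => exact absurd hc (by simp)
    | cons a b => exact ⟨a, b, rfl⟩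
  have hyhead : y = (t.takeWhile (fun x => !pvP x)).length := by
    have := pvHead_idx t
    rw [hy] at this; simpa using this
  rw [hy]
  simp only [List.map_cons, List.tail_cons, List.zip_cons_cons, List.map_cons]
  congr 1
  · simp only [List.drop_zero, Nat.sub_zero, List.take_succ_cons, List.map_cons]
    congr 1
    rw [hyhead]
    have hp := List.prefix_iff_eq_take.mp (List.takeWhile_prefix (l := t) (fun x => !pvP x))
    rw [← hp]
  · rw [show ((y + 1) :: List.map (fun x => x + 1) ys) = List.map (fun x => x + 1) (y :: ys) from
      by simp, List.zip_map, List.map_map]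
    apply List.map_congr_left
    intro q _
    simp only [Function.comp_apply, Prod.map_fst, Prod.map_snd, List.drop_succ_cons]
    have e : q.2 + 1 - (q.1 + 1) = q.2 - q.1 := by omega
    rw [e]

theorem pvAux_fst (s : List String) :
    (pvAux s).1 = (s.takeWhile (fun x => !pvP x)).map pvF := by
  induction s with
  | nil => simp [pvAux]
  | cons l t ih =>
    simp only [pvAux, List.takeWhile_cons]
    by_cases h : pvP l
    · simp [h]
    · simp [h, ih]

theorem pvBn_eq_aux (s : List String) : pvBn s = (pvAux s).2 := by
  induction s with
  | nil => simp [pvBn, pvIdx, pvAux]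
  | cons l t ih =>
    by_cases h : pvP l
    · rw [pvBn_cons_pos l t h, ih]
      simp [pvAux, h, pvAux_fst]
    · rw [pvBn_cons_neg l t (by simpa using h), ih]
      simp [pvAux, h]

-- ===== VERDICT (by name: the statement is the Claim_ definition above) =====
theorem group_by_id_spec : Claim_equal_group_by_id := by
  intro lines _
  unfold Spec_group_by_id
  rw [pvA_foldl, pvA_eq_aux, pvB_eq_bn, pvBn_eq_aux]
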